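-- pv_equiv track=rewrite | github.com/christopheradolphe/Python-School-Projects | midterm.py | share_n1
-- ===== SOURCE A (Python) =====
-- def share_n1(M1, M2):
--     columns = len(M1[0])
--     count = 0
--     flipped_matrix_M1 = []
--     flipped_matrix_M2 = []
--     for i in range(columns):
--         columnM1 = []
--         columnM2 = []
--         for j in range(len(M1)):
--             columnM1.append(M1[j][i])
--             columnM2.append(M2[j][i])
--         flipped_matrix_M1.append(columnM1)
--         flipped_matrix_M2.append(columnM2)
--     for x in range(len(flipped_matrix_M1)):
--         for y in range(len(flipped_matrix_M2)):
--             if flipped_matrix_M1[x] == flipped_matrix_M2[y]: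
--                 count += 1
--         #     if flipped_matrix_M1[i] == flipped_matrix_M2[0]:
--         #         count += 1
--         #     elif flipped_matrix_M1[i] == flipped_matrix_M2[1]:
--         #     count += 1
--         # elif flipped_matrix_M1[i] == flipped_matrix_M2[2]:
--         #     count += 1
--         # else:
--         #     pass
--     if count >= columns - 1:
--         return True
--     return False
-- ===== SOURCE B (Python) =====
-- def share_n1(M1, M2):
--     rows = len(M1)
--     columns = len(M1[0])
--     cols2 = [tuple(M2[j][i] for j in range(rows)) for i in range(columns)]
--     counts = {}
--     for col in cols2:
--         counts[col] = counts.get(col, 0) + 1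
--     total = 0
--     for i in range(columns):
--         total += counts.get(tuple(M1[j][i] for j in range(rows)), 0)
--     return total >= columns - 1
-- ===== Notes on version B (the rewrite author's own statement) =====
-- stated objective: faster
-- what changed: A transposes both matrices and counts matching columns with a nested all-pairs scan; B builds a dict counting M2's columns once and sums one dict lookup per M1 column, removing the inner scan.
import Mathlib
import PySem

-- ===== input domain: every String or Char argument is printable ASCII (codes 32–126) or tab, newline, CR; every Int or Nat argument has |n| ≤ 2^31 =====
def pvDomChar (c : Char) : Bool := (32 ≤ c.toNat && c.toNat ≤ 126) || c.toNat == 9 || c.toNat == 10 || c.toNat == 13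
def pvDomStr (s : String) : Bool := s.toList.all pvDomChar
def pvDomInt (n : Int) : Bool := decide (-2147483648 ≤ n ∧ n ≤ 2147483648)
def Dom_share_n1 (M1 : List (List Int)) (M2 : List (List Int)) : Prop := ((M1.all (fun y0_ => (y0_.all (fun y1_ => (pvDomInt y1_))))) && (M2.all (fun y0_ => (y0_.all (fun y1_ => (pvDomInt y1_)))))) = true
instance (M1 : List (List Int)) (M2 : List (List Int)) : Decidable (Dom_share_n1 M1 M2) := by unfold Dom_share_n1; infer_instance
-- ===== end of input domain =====

-- B replaces A's quadratic column-vs-column scan by a dict count of M2's columns, looked up once per M1 column.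


-- ===== PORT A =====
def share_n1 (M1 : List (List Int)) (M2 : List (List Int)) : Bool :=
  let columns : Int := (PySem.List.pyGetD M1 0 []).length
  let fl := (PySem.List.pyRange 0 columns 1).foldl
    (fun (p : List (List Int) × List (List Int)) i =>
      let cs := (PySem.List.pyRange 0 (M1.length : Int) 1).foldl
        (fun (q : List Int × List Int) j =>
          (q.1 ++ [PySem.List.pyGetD (PySem.List.pyGetD M1 j []) i 0],
           q.2 ++ [PySem.List.pyGetD (PySem.List.pyGetD M2 j []) i 0])) ([], [])
      (p.1 ++ [cs.1], p.2 ++ [cs.2])) ([], [])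
  let count : Int := (PySem.List.pyRange 0 (fl.1.length : Int) 1).foldl
    (fun acc x => (PySem.List.pyRange 0 (fl.2.length : Int) 1).foldl
      (fun acc y =>
        if PySem.List.pyGetD fl.1 x [] = PySem.List.pyGetD fl.2 y [] then acc + 1 else acc)
      acc) 0
  decide (count ≥ columns - 1)

-- ===== PORT B =====
def share_n1_alt (M1 : List (List Int)) (M2 : List (List Int)) : Bool :=
  let rows : Int := M1.length
  let columns : Int := (PySem.List.pyGetD M1 0 []).length
  -- cols2: the tuple comprehension in Source B, one column of M2 per i
  let cols2 := (PySem.List.pyRange 0 columns 1).map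
    (fun i => (PySem.List.pyRange 0 rows 1).map (fun j => PySem.List.pyGetD (PySem.List.pyGetD M2 j []) i 0))
  let counts := cols2.foldl (fun d c => d.insert c (d.getD c 0 + 1))
    (PySem.Dict.empty : PySem.Dict (List Int) Int)
  let total : Int := (PySem.List.pyRange 0 columns 1).foldl
    (fun acc i => acc + counts.getD
      ((PySem.List.pyRange 0 rows 1).map (fun j => PySem.List.pyGetD (PySem.List.pyGetD M1 j []) i 0)) 0) 0
  decide (total ≥ columns - 1)

-- ===== PRECONDITION & SPEC =====
-- Pre_ excludes exactly the inputs on which A raises IndexError: empty M1, or (when M1's first row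
-- is nonempty) an M2 with fewer rows than M1 or a row of M1/M2 shorter than M1's first row.
def Pre_share_n1 (M1 : List (List Int)) (M2 : List (List Int)) : Prop :=
  M1 ≠ [] ∧ ((M1.headD []).length = 0 ∨
    (M1.length ≤ M2.length ∧
     M1.all (fun r => (M1.headD []).length ≤ r.length) ∧
     (M2.take M1.length).all (fun r => (M1.headD []).length ≤ r.length)))
instance (M1 : List (List Int)) (M2 : List (List Int)) : Decidable (Pre_share_n1 M1 M2) := by unfold Pre_share_n1; infer_instance
def pvWitness_share_n1 : List (List Int) × List (List Int) := ([[1, 2], [3, 4]], [[1, 0], [3, 0]])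

def Spec_share_n1 (M1 : List (List Int)) (M2 : List (List Int)) (out : Bool) : Prop := out = share_n1_alt M1 M2
instance (M1 : List (List Int)) (M2 : List (List Int)) (out : Bool) : Decidable (Spec_share_n1 M1 M2 out) := by unfold Spec_share_n1; infer_instance

-- ===== CLAIM (what is proved, stated in full; the proofs are below) =====
def Claim_equal_share_n1 : Prop := ∀ (M1 : List (List Int)) (M2 : List (List Int)), Dom_share_n1 M1 M2 → Pre_share_n1 M1 M2 → Spec_share_n1 M1 M2 (share_n1 M1 M2)

-- ===== LEMMAS AND PROOFS =====

-- A's transpose loops (a pair of append-singleton folds) are the pair of maps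
theorem foldl_pair_append (l : List Int) (f g : Int → List Int) (a b : List (List Int)) :
    l.foldl (fun (p : List (List Int) × List (List Int)) i => (p.1 ++ [f i], p.2 ++ [g i])) (a, b)
      = (a ++ l.map f, b ++ l.map g) := by
  induction l generalizing a b with
  | nil => simp
  | cons x xs ih => simp [List.foldl_cons, ih]

theorem foldl_pair_append_int (l : List Int) (f g : Int → Int) (a b : List Int) :
    l.foldl (fun (q : List Int × List Int) j => (q.1 ++ [f j], q.2 ++ [g j])) (a, b)
      = (a ++ l.map f, b ++ l.map g) := by
  induction l generalizing a b with
  | nil => simp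
  | cons x xs ih => simp [List.foldl_cons, ih]

theorem foldl_count_eq (l : List Int) (p : Int → Prop) [DecidablePred p] (a : Int) :
    l.foldl (fun acc y => if p y then acc + 1 else acc) a
      = a + ((l.countP (fun y => decide (p y)) : Nat) : Int) := by
  induction l generalizing a with
  | nil => simp
  | cons x xs ih =>
    by_cases h : p x <;> simp [List.foldl_cons, h, ih]
    omega

theorem len_pyRange_int (c : Nat) : (((PySem.List.pyRange 0 (c : Int) 1).length : Nat) : Int) = (c : Int) := by
  rw [PySem.List.pyRange_zero_natCast]
  simp

-- the quadratic all-pairs scan over two mapped ranges equals the per-column count lookup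
theorem countfold_eq (c : Nat) (f g : Int → List Int) :
    (PySem.List.pyRange 0 (c : Int) 1).foldl
      (fun acc x => (PySem.List.pyRange 0 (c : Int) 1).foldl
        (fun acc y => if PySem.List.pyGetD ((PySem.List.pyRange 0 (c : Int) 1).map f) x []
                        = PySem.List.pyGetD ((PySem.List.pyRange 0 (c : Int) 1).map g) y []
                      then acc + 1 else acc) acc) (0 : Int)
    = (PySem.List.pyRange 0 (c : Int) 1).foldl
      (fun acc i => acc + ((((PySem.List.pyRange 0 (c : Int) 1).map g).count (f i) : Nat) : Int)) 0 := by
  apply PySem.List.foldl_congr_mem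
  intro acc x hx
  obtain ⟨hx0, hxc⟩ := PySem.List.mem_pyRange_one.mp hx
  have hk : x = ((x.toNat : Nat) : Int) := by omega
  have hkc : x.toNat < c := by omega
  rw [foldl_count_eq]
  congr 1
  have hfx : PySem.List.pyGetD ((PySem.List.pyRange 0 (c : Int) 1).map f) x [] = f x := by
    rw [hk, PySem.List.pyGetD_map_pyRange f c x.toNat [] hkc]
  rw [hfx]
  norm_cast
  rw [PySem.List.pyRange_zero_natCast, List.countP_map, List.map_map, List.count_eq_countP,
      List.countP_map]
  apply List.countP_congr
  intro m hm
  have hmc : m < c := List.mem_range.mp hm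
  have hgm : PySem.List.pyGetD (List.map (g ∘ fun k => ((k : Nat) : Int)) (List.range c)) ((m : Nat) : Int) []
      = g ((m : Nat) : Int) := by
    rw [← List.map_map, ← PySem.List.pyRange_zero_natCast]
    exact PySem.List.pyGetD_map_pyRange g c m [] hmc
  simp only [Function.comp_apply]
  rw [hgm]
  simp only [decide_eq_true_eq, beq_iff_eq]
  exact eq_comm

theorem share_n1_eq_alt (M1 M2 : List (List Int)) : share_n1 M1 M2 = share_n1_alt M1 M2 := by
  simp only [share_n1, share_n1_alt, foldl_pair_append_int, foldl_pair_append, List.nil_append,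
    PySem.Dict.foldl_insert_getD_add_one_eq_counter, PySem.Dict.getD_counter,
    List.length_map]
  rw [len_pyRange_int, countfold_eq]

-- ===== VERDICT (by name: the statement is the Claim_ definition above) =====
theorem share_n1_spec : Claim_equal_share_n1 := by
  intro M1 M2 _ _
  unfold Spec_share_n1
  exact share_n1_eq_alt M1 M2
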